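-- pv_equiv track=rewrite | github.com/lucasgsfelix/Exerc-cios-de-PAA | div_conq_string_bin.py | merge_cont
-- ===== SOURCE A (Python) =====
-- import math
--
-- def merge_cont(lista, h, t):
--
-- 	q = math.ceil((t+h)/2)
-- 	if(h == t):
-- 		cont = 0
-- 		if(lista[h] == '0'):
-- 			cont += 1
-- 		return cont
-- 	else:
-- 		return merge_cont(lista, h, q-1) + merge_cont(lista, q, t)
-- ===== SOURCE B (Python) =====
-- def merge_cont(lista, h, t):
--     cont = 0
--     for i in range(h, t + 1):
--         if lista[i] == '0':
--             cont += 1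
--     return cont
-- ===== Notes on version B (the rewrite author's own statement) =====
-- stated objective: simpler
-- what changed: Replaced the divide-and-conquer recursion (midpoint split and summing the two halves) with a single iterative pass that keeps one running counter over the index range.
import Mathlib
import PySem

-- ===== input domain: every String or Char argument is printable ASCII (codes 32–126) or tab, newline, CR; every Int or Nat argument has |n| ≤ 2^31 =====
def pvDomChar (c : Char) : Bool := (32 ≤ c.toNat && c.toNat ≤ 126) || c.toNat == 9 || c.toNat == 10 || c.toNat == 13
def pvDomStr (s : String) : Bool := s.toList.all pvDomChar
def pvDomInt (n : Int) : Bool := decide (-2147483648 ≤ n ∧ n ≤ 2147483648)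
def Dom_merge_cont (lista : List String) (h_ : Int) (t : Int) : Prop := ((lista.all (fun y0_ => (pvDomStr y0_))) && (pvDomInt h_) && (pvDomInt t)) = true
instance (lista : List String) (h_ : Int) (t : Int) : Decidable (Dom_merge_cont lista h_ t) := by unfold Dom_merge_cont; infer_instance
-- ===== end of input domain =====

-- B replaces A's divide-and-conquer recursion with one iterative counting pass (objective: simpler).

-- ===== PORT A =====
-- q = math.ceil((t+h)/2): for |t+h| ≤ 2^32 the float division (t+h)/2 is exact, so the
-- ceiling equals integer floordiv (t+h+1) // 2, which is how it is ported.
def merge_cont (lista : List String) (h_ : Int) (t : Int) : Int :=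
  let q := PySem.Int.floordiv (t + h_ + 1) 2
  if h_ = t then
    (if PySem.List.pyGetD lista h_ "" == "0" then (1 : Int) else 0)
  else if h_ < t then
    merge_cont lista h_ (q - 1) + merge_cont lista q t
  else 0  -- Python recurses forever here (h > t); excluded by Pre_
termination_by (t - h_).toNat
decreasing_by
  · rw [PySem.Int.floordiv_eq_ediv_of_pos (by omega)]; omega
  · rw [PySem.Int.floordiv_eq_ediv_of_pos (by omega)]; omega

-- ===== PORT B =====
def merge_cont_alt (lista : List String) (h_ : Int) (t : Int) : Int :=
  (PySem.List.pyRange h_ (t + 1) 1).foldl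
    (fun cont i => if PySem.List.pyGetD lista i "" == "0" then cont + 1 else cont) 0

-- ===== PRECONDITION & SPEC =====
-- Pre_ excludes exactly the inputs where the Python A raises: h > t (infinite recursion,
-- RecursionError) and any index in [h, t] out of Python's (negative-wrapping) range (IndexError).
def Pre_merge_cont (lista : List String) (h_ : Int) (t : Int) : Prop :=
  h_ ≤ t ∧ -(lista.length : Int) ≤ h_ ∧ t < (lista.length : Int)
instance (lista : List String) (h_ : Int) (t : Int) : Decidable (Pre_merge_cont lista h_ t) := by unfold Pre_merge_cont; infer_instance

def pvWitness_merge_cont : List String × Int × Int := (["0", "1", "0", "x"], 0, 3)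

def Spec_merge_cont (lista : List String) (h_ : Int) (t : Int) (out : Int) : Prop := out = merge_cont_alt lista h_ t
instance (lista : List String) (h_ : Int) (t : Int) (out : Int) : Decidable (Spec_merge_cont lista h_ t out) := by unfold Spec_merge_cont; infer_instance

-- ===== CLAIM (what is proved, stated in full; the proofs are below) =====
def Claim_equal_merge_cont : Prop := ∀ (lista : List String) (h_ : Int) (t : Int), Dom_merge_cont lista h_ t → Pre_merge_cont lista h_ t → Spec_merge_cont lista h_ t (merge_cont lista h_ t)

-- ===== LEMMAS AND PROOFS =====

-- B's loop, rewritten as a countP of the index range (via foldl_if_add_one).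
theorem merge_cont_alt_eq_countP (lista : List String) (h_ t : Int) :
    merge_cont_alt lista h_ t =
      ((PySem.List.pyRange h_ (t + 1) 1).countP
        (fun i => PySem.List.pyGetD lista i "" == "0") : Int) := by
  unfold merge_cont_alt
  rw [PySem.List.foldl_if_add_one]
  simp

-- A's recursion also computes that countP, for any h ≤ t (no range condition needed,
-- since both ports read through pyGetD with the same default).
theorem merge_cont_eq_countP (lista : List String) :
    ∀ (n : Nat) (h_ t : Int), (t - h_).toNat = n → h_ ≤ t →
      merge_cont lista h_ t =
        ((PySem.List.pyRange h_ (t + 1) 1).countP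
          (fun i => PySem.List.pyGetD lista i "" == "0") : Int) := by
  intro n
  induction n using Nat.strong_induction_on with
  | _ n ih =>
    intro h_ t hn hle
    rw [merge_cont]
    by_cases heq : h_ = t
    · subst heq
      rw [if_pos rfl]
      rw [PySem.List.pyRange_one_cons (by omega), PySem.List.pyRange_one_eq_nil (by omega)]
      by_cases hp : PySem.List.pyGetD lista h_ "" == "0" <;> simp [hp]
    · have hlt : h_ < t := lt_of_le_of_ne hle heq
      have hq : h_ + 1 ≤ PySem.Int.floordiv (t + h_ + 1) 2 ∧
          PySem.Int.floordiv (t + h_ + 1) 2 ≤ t := by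
        rw [PySem.Int.floordiv_eq_ediv_of_pos (by omega)]; omega
      simp only [if_neg heq, if_pos hlt]
      set q := PySem.Int.floordiv (t + h_ + 1) 2 with hqdef
      rw [ih (q - 1 - h_).toNat (by omega) h_ (q - 1) rfl (by omega),
          ih (t - q).toNat (by omega) q t rfl (by omega)]
      rw [PySem.List.pyRange_one_append h_ q (t + 1) (by omega) (by omega)]
      rw [List.countP_append]
      have : q - 1 + 1 = q := by omega
      rw [this]
      push_cast
      ring

-- ===== VERDICT (by name: the statement is the Claim_ definition above) =====
theorem merge_cont_spec : Claim_equal_merge_cont := by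
  intro lista h_ t _ hpre
  unfold Spec_merge_cont
  rw [merge_cont_alt_eq_countP,
      merge_cont_eq_countP lista (t - h_).toNat h_ t rfl hpre.1]
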